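-- pv_equiv track=rewrite | github.com/fenghaitao/simics-7-packages-2025-38-linux64 | simics-7.57.0/linux64/lib/python-py3/simmod/code_coverage/common.py | function_start_addresses_in_range
-- ===== SOURCE A (Python) =====
-- def function_start_addresses_in_range(function_addrs, start_addr, end_addr,
--                                       include_range_start):
--     assert function_addrs
--     addrs_in_range = []
--     function_at_start = False
--     for addr in function_addrs:
--         if start_addr <= addr <= end_addr:
--             if addr == start_addr:
--                 function_at_start = True
--             addrs_in_range.append(addr)
--     if include_range_start and not function_at_start:
--         # Include start of section as well.
--         addrs_in_range = [start_addr] + addrs_in_range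
--     return sorted(addrs_in_range)
-- ===== SOURCE B (Python) =====
-- def _bisect_left(a, x):
--     lo, hi = 0, len(a)
--     while lo < hi:
--         mid = (lo + hi) // 2
--         if a[mid] < x:
--             lo = mid + 1
--         else:
--             hi = mid
--     return lo
--
--
-- def _bisect_right(a, x):
--     lo, hi = 0, len(a)
--     while lo < hi:
--         mid = (lo + hi) // 2
--         if x < a[mid]:
--             hi = mid
--         else:
--             lo = mid + 1
--     return lo
--
--
-- def function_start_addresses_in_range(function_addrs, start_addr, end_addr,
--                                       include_range_start):
--     assert function_addrs
--     ordered = sorted(function_addrs)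
--     lo = _bisect_left(ordered, start_addr)
--     hi = _bisect_right(ordered, end_addr)
--     in_range = ordered[lo:hi]
--     start_present = lo < hi and ordered[lo] == start_addr
--     if include_range_start and not start_present:
--         return [start_addr] + in_range
--     return in_range
-- ===== Notes on version B (the rewrite author's own statement) =====
-- stated objective: alternative
-- what changed: Instead of filtering the whole list with a running start-seen flag and then sorting the (possibly prepended) selection, B sorts the input once and extracts the in-range addresses as a contiguous slice between hand-written bisect_left/bisect_right bounds, checking start presence at the slice head.
import Mathlib
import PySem

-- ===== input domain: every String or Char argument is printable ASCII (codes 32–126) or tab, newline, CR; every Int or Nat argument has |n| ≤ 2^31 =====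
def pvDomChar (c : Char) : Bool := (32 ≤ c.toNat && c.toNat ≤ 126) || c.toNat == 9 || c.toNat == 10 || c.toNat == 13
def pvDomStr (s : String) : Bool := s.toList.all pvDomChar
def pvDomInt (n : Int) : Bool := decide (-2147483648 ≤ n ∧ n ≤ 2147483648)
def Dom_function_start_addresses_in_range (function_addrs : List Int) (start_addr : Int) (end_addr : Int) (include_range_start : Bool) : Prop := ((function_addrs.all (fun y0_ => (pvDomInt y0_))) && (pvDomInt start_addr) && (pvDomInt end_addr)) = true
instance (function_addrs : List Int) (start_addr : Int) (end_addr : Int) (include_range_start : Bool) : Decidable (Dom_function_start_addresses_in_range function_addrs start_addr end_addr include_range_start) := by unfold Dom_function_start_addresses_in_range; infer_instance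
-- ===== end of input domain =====

-- B replaces A's filter-then-sort-with-flag by sort-once + bisect slice; equivalence of the RETURN value is proved for nonempty input lists (A's assert).

-- ===== PORT A =====
def function_start_addresses_in_range (function_addrs : List Int) (start_addr : Int) (end_addr : Int) (include_range_start : Bool) : List Int :=
  -- for addr in function_addrs: if start_addr <= addr <= end_addr: append, flag start
  let st := function_addrs.foldl
    (fun (st : List Int × Bool) addr =>
      if start_addr ≤ addr ∧ addr ≤ end_addr then
        (st.1 ++ [addr], if addr = start_addr then true else st.2)
      else st)
    ([], false)
  let addrs_in_range := if include_range_start && !st.2 then [start_addr] ++ st.1 else st.1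
  PySem.List.sorted addrs_in_range (fun x => x) false

-- ===== PORT B =====
def function_start_addresses_in_range_alt (function_addrs : List Int) (start_addr : Int) (end_addr : Int) (include_range_start : Bool) : List Int :=
  let ordered := PySem.List.sorted function_addrs (fun x => x) false
  let lo := PySem.List.bisectLeft ordered start_addr    -- hand-written _bisect_left in Source B: same loop as PySem's
  let hi := PySem.List.bisectRight ordered end_addr     -- hand-written _bisect_right in Source B: same loop as PySem's
  let in_range := PySem.List.slice ordered (some (lo : Int)) (some (hi : Int))
  let start_present := decide (lo < hi) && (ordered.getD lo 0 == start_addr)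
  if include_range_start && !start_present then [start_addr] ++ in_range else in_range

-- ===== PRECONDITION & SPEC =====
-- Pre_ excludes only the empty list, on which A's `assert function_addrs` raises AssertionError.
def Pre_function_start_addresses_in_range (function_addrs : List Int) (start_addr : Int) (end_addr : Int) (include_range_start : Bool) : Prop := function_addrs ≠ []
instance (function_addrs : List Int) (start_addr : Int) (end_addr : Int) (include_range_start : Bool) : Decidable (Pre_function_start_addresses_in_range function_addrs start_addr end_addr include_range_start) := by unfold Pre_function_start_addresses_in_range; infer_instance
def pvWitness_function_start_addresses_in_range : List Int × Int × Int × Bool := ([5, 1, 3], 2, 4, true)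

def Spec_function_start_addresses_in_range (function_addrs : List Int) (start_addr : Int) (end_addr : Int) (include_range_start : Bool) (out : List Int) : Prop := out = function_start_addresses_in_range_alt function_addrs start_addr end_addr include_range_start
instance (function_addrs : List Int) (start_addr : Int) (end_addr : Int) (include_range_start : Bool) (out : List Int) : Decidable (Spec_function_start_addresses_in_range function_addrs start_addr end_addr include_range_start out) := by unfold Spec_function_start_addresses_in_range; infer_instance

-- ===== CLAIM (what is proved, stated in full; the proofs are below) =====
def Claim_equal_function_start_addresses_in_range : Prop := ∀ (function_addrs : List Int) (start_addr : Int) (end_addr : Int) (include_range_start : Bool), Dom_function_start_addresses_in_range function_addrs start_addr end_addr include_range_start → Pre_function_start_addresses_in_range function_addrs start_addr end_addr include_range_start → Spec_function_start_addresses_in_range function_addrs start_addr end_addr include_range_start (function_start_addresses_in_range function_addrs start_addr end_addr include_range_start)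

-- ===== LEMMAS AND PROOFS =====

-- A's loop = filter + "start seen" flag
theorem foldA_eq (s e : Int) (xs : List Int) (acc : List Int) (b : Bool) :
    xs.foldl (fun (st : List Int × Bool) addr =>
      if s ≤ addr ∧ addr ≤ e then
        (st.1 ++ [addr], if addr = s then true else st.2)
      else st) (acc, b)
    = (acc ++ xs.filter (fun a => decide (s ≤ a ∧ a ≤ e)),
       b || xs.any (fun a => decide (a = s ∧ s ≤ a ∧ a ≤ e))) := by
  induction xs generalizing acc b with
  | nil => simp
  | cons x xs ih =>
    simp only [List.foldl_cons, List.filter_cons, List.any_cons]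
    by_cases h : s ≤ x ∧ x ≤ e
    · rw [if_pos h, ih]
      by_cases hx : x = s
      · have hse : s ≤ e := hx ▸ h.2
        simp [hx, hse]
      · simp [hx, h]
    · rw [if_neg h, ih]
      simp [h]

-- generic: a predicate true exactly on indices < k picks out the prefix
theorem filter_eq_take (p : Int → Bool) (M : List Int) (k : Nat)
    (h : ∀ j (hj : j < M.length), p M[j] = decide (j < k)) :
    M.filter p = M.take k := by
  induction M generalizing k with
  | nil => simp
  | cons a M ih =>
    have h0 := h 0 (by simp)
    cases k with
    | zero =>
      simp only [List.getElem_cons_zero, Nat.lt_irrefl, decide_false] at h0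
      have hM : M.filter p = M.take 0 := ih 0 (by
        intro j hj
        have := h (j+1) (by simp only [List.length_cons]; omega)
        simpa using this)
      simp [List.filter_cons, h0, hM]
    | succ k' =>
      simp only [List.getElem_cons_zero] at h0
      have hpa : p a = true := by simpa using h0
      have hM : M.filter p = M.take k' := ih k' (by
        intro j hj
        have := h (j+1) (by simp only [List.length_cons]; omega)
        simpa [Nat.succ_lt_succ_iff] using this)
      simp [List.filter_cons, hpa, hM, List.take_succ_cons]

theorem sorted_cons_of_le (s : Int) (ys : List Int) (h : ∀ y ∈ ys, s ≤ y) :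
    PySem.List.sorted (s :: ys) (fun x => x) false = s :: PySem.List.sorted ys (fun x => x) false := by
  apply PySem.List.sorted_id_eq_of_perm_of_pairwise
  · exact (PySem.List.sorted_perm ys (fun x => x) false).cons s
  · refine List.Pairwise.cons ?_ ?_
    · intro y hy
      exact h y ((PySem.List.mem_sorted ys (fun x => x) false y).1 hy)
    · have := PySem.List.sorted_pairwise ys (fun x => x)
      simpa using this

theorem sorted_filter_comm (p : Int → Bool) (xs : List Int) :
    PySem.List.sorted (xs.filter p) (fun x => x) false
      = (PySem.List.sorted xs (fun x => x) false).filter p := by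
  apply PySem.List.sorted_id_eq_of_perm_of_pairwise
  · exact ((PySem.List.sorted_perm xs (fun x => x) false).filter p)
  · exact List.Pairwise.filter p (by simpa using PySem.List.sorted_pairwise xs (fun x => x))


-- generic: a predicate true exactly on indices in [lo,hi) picks out a contiguous slice
theorem filter_eq_drop_take (p : Int → Bool) (M : List Int) (lo hi : Nat)
    (h : ∀ j (hj : j < M.length), p M[j] = decide (lo ≤ j ∧ j < hi)) :
    M.filter p = (M.drop lo).take (hi - lo) := by
  induction M generalizing lo hi with
  | nil => simp
  | cons a M ih =>
    have h0 := h 0 (by simp)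
    simp only [List.getElem_cons_zero] at h0
    cases lo with
    | succ l =>
      have hpa : p a = false := by rw [h0]; simp
      have hM : M.filter p = (M.drop l).take (hi - 1 - l) := by
        apply ih
        intro j hj
        have := h (j+1) (by simp only [List.length_cons]; omega)
        simp only [List.getElem_cons_succ] at this
        rw [this]
        exact decide_eq_decide.2 (by omega)
      have harith : hi - (l + 1) = hi - 1 - l := by omega
      simp [List.filter_cons, hpa, hM, harith]
    | zero =>
      cases hi with
      | zero =>
        have : M.filter p = [] ∧ p a = false := by
          constructor
          · have := filter_eq_take p M 0 (by
              intro j hj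
              have := h (j+1) (by simp only [List.length_cons]; omega)
              simp only [List.getElem_cons_succ] at this
              rw [this]; simp)
            simpa using this
          · simpa using h0
        simp [List.filter_cons, this.1, this.2]
      | succ k =>
        have hpa : p a = true := by simpa using h0
        have hM := ih 0 (k) (by
          intro j hj
          have := h (j+1) (by simp only [List.length_cons]; omega)
          simp only [List.getElem_cons_succ] at this
          rw [this]
          exact decide_eq_decide.2 (by omega))
        simp only [Nat.sub_zero, List.drop_zero] at hM
        simp [List.filter_cons, hpa, hM]

-- ===== VERDICT (by name: the statement is the Claim_ definition above) =====
theorem function_start_addresses_in_range_spec : Claim_equal_function_start_addresses_in_range := by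
  intro xs s e inc _ _
  unfold Spec_function_start_addresses_in_range
  simp only [function_start_addresses_in_range, function_start_addresses_in_range_alt]
  rw [foldA_eq]
  simp only [List.nil_append, Bool.false_or]
  rw [PySem.List.slice_natCast]
  set O := PySem.List.sorted xs (fun x => x) false with hO
  set lo := PySem.List.bisectLeft O s with hlo
  set hi := PySem.List.bisectRight O e with hhi
  have hpw : O.Pairwise (· ≤ ·) := by
    rw [hO]; simpa using PySem.List.sorted_pairwise xs (fun x => x)
  obtain ⟨hL1, hL2, hL3⟩ := PySem.List.bisectLeft_spec O s hpw
  obtain ⟨hR1, hR2, hR3⟩ := PySem.List.bisectRight_spec O e hpw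
  have hidx : ∀ j (hj : j < O.length), (decide (s ≤ O[j] ∧ O[j] ≤ e)) = decide (lo ≤ j ∧ j < hi) := by
    intro j hj
    apply decide_eq_decide.2
    constructor
    · rintro ⟨h1, h2⟩
      refine ⟨?_, ?_⟩
      · by_contra hc
        push_neg at hc
        have := hL2 j hj hc
        omega
      · by_contra hc
        push_neg at hc
        have := hR3 j hj hc
        omega
    · rintro ⟨h1, h2⟩
      exact ⟨hL3 j hj h1, hR2 j hj h2⟩
  have hfilter : O.filter (fun a => decide (s ≤ a ∧ a ≤ e)) = (O.drop lo).take (hi - lo) :=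
    filter_eq_drop_take _ O lo hi (by intro j hj; exact hidx j hj)
  have hF : PySem.List.sorted (xs.filter (fun a => decide (s ≤ a ∧ a ≤ e))) (fun x => x) false
      = (O.drop lo).take (hi - lo) := by
    rw [sorted_filter_comm, ← hO, hfilter]
  have hmemO : ∀ y : Int, y ∈ O ↔ y ∈ xs := by
    intro y; rw [hO]; exact PySem.List.mem_sorted xs (fun x => x) false y
  have hflag : (xs.any (fun a => decide (a = s ∧ s ≤ a ∧ a ≤ e)))
      = (decide (lo < hi) && (O.getD lo 0 == s)) := by
    rw [Bool.eq_iff_iff]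
    constructor
    · intro hp
      simp only [List.any_eq_true, decide_eq_true_eq] at hp
      obtain ⟨a, ha, rfl, _, hse⟩ := hp
      have hsO : a ∈ O := (hmemO a).2 ha
      obtain ⟨j, hj, hjs⟩ := List.mem_iff_getElem.1 hsO
      have hx : (decide (a ≤ O[j] ∧ O[j] ≤ e)) = true := by
        rw [hjs]; exact decide_eq_true ⟨le_refl a, hse⟩
      rw [hidx j hj] at hx
      obtain ⟨hj1, hj2⟩ := decide_eq_true_eq.mp hx
      have hlt : lo < hi := lt_of_le_of_lt hj1 hj2
      have hlen : lo < O.length := lt_of_lt_of_le hlt hR1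
      have hOlo_le : O[lo] ≤ O[j] := by
        have hj2' : j < (PySem.List.sorted xs (fun x => x) false).length := hj
        exact PySem.List.sorted_id_getElem_mono xs hj1 hj2'
      have hslo : a ≤ O[lo] := hL3 lo hlen (le_refl lo)
      have heq : O[lo] = a := le_antisymm (hjs ▸ hOlo_le) hslo
      simp only [Bool.and_eq_true, decide_eq_true_eq, beq_iff_eq]
      exact ⟨hlt, by rw [List.getD_eq_getElem O 0 hlen]; exact heq⟩
    · intro hp
      simp only [Bool.and_eq_true, decide_eq_true_eq, beq_iff_eq] at hp
      obtain ⟨hlt, hget⟩ := hp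
      have hlen : lo < O.length := lt_of_lt_of_le hlt hR1
      rw [List.getD_eq_getElem O 0 hlen] at hget
      have hse : s ≤ e := by
        have h1 := hR2 lo hlen hlt
        have h2 := hL3 lo hlen (le_refl lo)
        omega
      simp only [List.any_eq_true, decide_eq_true_eq]
      exact ⟨s, (hmemO s).1 (hget ▸ List.getElem_mem hlen), rfl, le_refl s, hse⟩
  rw [← hflag]
  by_cases hb : (inc && !(xs.any (fun a => decide (a = s ∧ s ≤ a ∧ a ≤ e)))) = true
  case neg =>
    rw [if_neg hb, if_neg hb]
    exact hF
  case pos =>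
    rw [if_pos hb, if_pos hb]
    have hcons : PySem.List.sorted ([s] ++ xs.filter (fun a => decide (s ≤ a ∧ a ≤ e))) (fun x => x) false
        = s :: PySem.List.sorted (xs.filter (fun a => decide (s ≤ a ∧ a ≤ e))) (fun x => x) false := by
      apply sorted_cons_of_le
      intro y hy
      have := List.of_mem_filter hy
      simp only [decide_eq_true_eq] at this
      exact this.1
    rw [hcons, hF]
    rfl
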